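-- pv_equiv track=rewrite | github.com/itsaquestion/FollowChat | gen_script2.py | find_string_with_most_colons
-- ===== SOURCE A (Python) =====
-- def find_string_with_most_colons(strings):
--     max_colon_count = 0
--     max_colon_string = ""
--
--     for string in strings:
--         colon_count = string.count("::")
--         if colon_count > max_colon_count:
--             max_colon_count = colon_count
--             max_colon_string = string
--
--     return max_colon_string.strip()
-- ===== SOURCE B (Python) =====
-- def find_string_with_most_colons(strings):
--     # Stable sort by '::' count, descending: the head is the first string
--     # with the maximal count; return '' for empty input or all-zero counts.
--     ranked = sorted(strings, key=lambda s: s.count("::"), reverse=True)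
--     if not ranked or ranked[0].count("::") == 0:
--         return ""
--     return ranked[0].strip()
-- ===== Notes on version B (the rewrite author's own statement) =====
-- stated objective: alternative
-- what changed: Replaces A's single-pass running-max loop with a sort-then-pick strategy: stable-sort the strings by '::' count in descending order, take the head, and return '' when the list is empty or the top count is zero; stability of sorted with reverse=True makes the first occurrence win ties, matching A's strict '>' update.
import Mathlib
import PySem

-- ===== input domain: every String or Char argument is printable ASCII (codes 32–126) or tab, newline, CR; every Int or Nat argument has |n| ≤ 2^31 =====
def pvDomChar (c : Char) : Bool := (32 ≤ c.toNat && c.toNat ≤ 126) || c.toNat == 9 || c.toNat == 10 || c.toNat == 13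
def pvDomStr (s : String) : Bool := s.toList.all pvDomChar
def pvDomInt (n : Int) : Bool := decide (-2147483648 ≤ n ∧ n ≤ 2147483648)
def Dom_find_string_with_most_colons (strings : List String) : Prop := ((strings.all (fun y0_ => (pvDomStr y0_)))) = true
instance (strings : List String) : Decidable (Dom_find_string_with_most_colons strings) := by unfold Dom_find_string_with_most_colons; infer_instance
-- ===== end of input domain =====

-- B replaces A's running-max loop by a stable descending sort on the '::' count and picks the head (alternative decomposition, not faster).

-- ===== PORT A =====
-- loop body of A's 'for string in strings'
def pvAStep (st : Nat × String) (s : String) : Nat × String :=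
  let colon_count := PySem.Str.count s "::"
  if colon_count > st.1 then (colon_count, s) else st

def find_string_with_most_colons (strings : List String) : String :=
  PySem.Str.strip (strings.foldl pvAStep (0, "")).2

-- ===== PORT B =====
def find_string_with_most_colons_alt (strings : List String) : String :=
  let ranked := PySem.List.sorted strings (fun s => PySem.Str.count s "::") true
  match ranked with
  | [] => ""
  | best :: _ => if PySem.Str.count best "::" == 0 then "" else PySem.Str.strip best

-- ===== PRECONDITION & SPEC =====
def Spec_find_string_with_most_colons (strings : List String) (out : String) : Prop := out = find_string_with_most_colons_alt strings
instance (strings : List String) (out : String) : Decidable (Spec_find_string_with_most_colons strings out) := by unfold Spec_find_string_with_most_colons; infer_instance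

-- ===== CLAIM (what is proved, stated in full; the proofs are below) =====
def Claim_equal_find_string_with_most_colons : Prop := ∀ (strings : List String), Dom_find_string_with_most_colons strings → Spec_find_string_with_most_colons strings (find_string_with_most_colons strings)

-- ===== LEMMAS AND PROOFS =====

def pvKey (s : String) : Nat := PySem.Str.count s "::"

-- Invariant tying B's partially built sorted list to A's (count, string) accumulator:
-- the head of the sorted accumulator carries the running max count, and is A's pick when positive.
def pvOK (acc : List String) (st : Nat × String) : Prop :=
  match acc with
  | [] => st.1 = 0 ∧ st.2 = ""
  | h :: _ => pvKey h = st.1 ∧ (0 < st.1 → h = st.2) ∧ (st.1 = 0 → st.2 = "")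

lemma pv_insert_nil (f : String → String → Bool) (x : String) :
    PySem.List.insertBy f x [] = [x] := by simp [PySem.List.insertBy]

lemma pv_insert_cons (f : String → String → Bool) (x hd : String) (tl : List String) :
    PySem.List.insertBy f x (hd :: tl) =
      if f x hd then x :: hd :: tl else hd :: PySem.List.insertBy f x tl := by
  simp [PySem.List.insertBy]

lemma pv_step (acc : List String) (st : Nat × String) (x : String) (h : pvOK acc st) :
    pvOK (PySem.List.insertBy (fun a b => decide (pvKey b < pvKey a)) x acc) (pvAStep st x) := by
  have hstep : pvAStep st x = if st.1 < pvKey x then (pvKey x, x) else st := rfl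
  cases acc with
  | nil =>
    obtain ⟨h1, h2⟩ := h
    rw [pv_insert_nil, hstep]
    by_cases hx : st.1 < pvKey x
    · rw [if_pos hx]
      exact ⟨rfl, fun _ => rfl, fun hz => by omega⟩
    · rw [if_neg hx]
      exact ⟨by omega, fun hp => by omega, fun _ => h2⟩
  | cons hd tl =>
    obtain ⟨h1, h2, h3⟩ := h
    rw [pv_insert_cons, hstep]
    by_cases hlt : pvKey hd < pvKey x
    · have hx : st.1 < pvKey x := h1 ▸ hlt
      rw [if_pos (by simpa using hlt), if_pos hx]
      exact ⟨rfl, fun _ => rfl, fun hz => by omega⟩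
    · have hx : ¬ st.1 < pvKey x := h1 ▸ hlt
      rw [if_neg (by simpa using hlt), if_neg hx]
      exact ⟨h1, h2, h3⟩

lemma pv_fold (l : List String) : ∀ (acc : List String) (st : Nat × String), pvOK acc st →
    pvOK (l.foldl (fun acc x => PySem.List.insertBy (fun a b => decide (pvKey b < pvKey a)) x acc) acc)
         (l.foldl pvAStep st) := by
  induction l with
  | nil => intro acc st h; exact h
  | cons s t ih => intro acc st h; exact ih _ _ (pv_step acc st s h)

lemma pv_strip_empty : PySem.Str.strip "" = "" := by decide

-- ===== VERDICT (by name: the statement is the Claim_ definition above) =====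
theorem find_string_with_most_colons_spec : Claim_equal_find_string_with_most_colons := by
  intro strings _
  unfold Spec_find_string_with_most_colons find_string_with_most_colons find_string_with_most_colons_alt
  have hs : PySem.List.sorted strings (fun s => PySem.Str.count s "::") true =
      strings.foldl (fun acc x => PySem.List.insertBy (fun a b => decide (pvKey b < pvKey a)) x acc) [] :=
    PySem.List.sorted_rev_eq_foldl_insertBy strings _
  have h := pv_fold strings [] (0, "") ⟨rfl, rfl⟩
  rw [hs]
  set res := strings.foldl (fun acc x => PySem.List.insertBy (fun a b => decide (pvKey b < pvKey a)) x acc) []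
  set st := strings.foldl pvAStep (0, "")
  cases hres : res with
  | nil =>
    rw [hres] at h
    obtain ⟨_, h2⟩ := h
    rw [h2]
    exact pv_strip_empty
  | cons best rest =>
    rw [hres] at h
    obtain ⟨h1, h2, h3⟩ := h
    by_cases hz : pvKey best = 0
    · have hc : st.1 = 0 := by rw [← h1]; exact hz
      rw [h3 hc]
      show PySem.Str.strip "" = if (PySem.Str.count best "::" == 0) = true then "" else PySem.Str.strip best
      have hz' : PySem.Str.count best "::" = 0 := hz
      rw [if_pos (beq_iff_eq.mpr hz'), pv_strip_empty]
    · have hpos : 0 < st.1 := by omega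
      show PySem.Str.strip st.2 = if (PySem.Str.count best "::" == 0) = true then "" else PySem.Str.strip best
      have hz' : ¬ PySem.Str.count best "::" = 0 := hz
      rw [if_neg (by simpa using hz'), ← h2 hpos]
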